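-- pv_equiv track=rewrite | github.com/nastyh/LeetCode | Basic Data Structures/mutate_the_array.py | mutate_array
-- ===== SOURCE A (Python) =====
-- def mutate_array(n, a):
--     """
--     O(n) to iterate over the list a of length n
--     O(n) to create a new list b of size n
--     For each index i in a
--     Check if i - 1 is valid; if not, use 0.
--     Check if i + 1 is valid; if not, use 0.
--     Calculate b[i] as the sum of these values.
--     """
--     # Initialize the resulting array
--     b = [0] * n
--     # Calculate each element in b
--     for i in range(n):
--         left = a[i - 1] if i - 1 >= 0 else 0
--         middle = a[i]
--         right = a[i + 1] if i + 1 < n else 0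
--         b[i] = left + middle + right
--     return b
-- ===== SOURCE B (Python) =====
-- def mutate_array(n, a):
--     # Prefix sums: p[j] = a[0]+...+a[j-1]; each window sum is a difference
--     # of two prefix sums with clamped bounds.
--     p = [0]
--     for x in a[:n]:
--         p.append(p[-1] + x)
--     return [p[min(i + 2, n)] - p[max(i - 1, 0)] for i in range(n)]
-- ===== Notes on version B (the rewrite author's own statement) =====
-- stated objective: alternative
-- what changed: B first builds a prefix-sum array of the input in one pass and then computes each window as a difference of two clamped prefix sums, instead of A's direct per-index summation of guarded neighbors.
import Mathlib
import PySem

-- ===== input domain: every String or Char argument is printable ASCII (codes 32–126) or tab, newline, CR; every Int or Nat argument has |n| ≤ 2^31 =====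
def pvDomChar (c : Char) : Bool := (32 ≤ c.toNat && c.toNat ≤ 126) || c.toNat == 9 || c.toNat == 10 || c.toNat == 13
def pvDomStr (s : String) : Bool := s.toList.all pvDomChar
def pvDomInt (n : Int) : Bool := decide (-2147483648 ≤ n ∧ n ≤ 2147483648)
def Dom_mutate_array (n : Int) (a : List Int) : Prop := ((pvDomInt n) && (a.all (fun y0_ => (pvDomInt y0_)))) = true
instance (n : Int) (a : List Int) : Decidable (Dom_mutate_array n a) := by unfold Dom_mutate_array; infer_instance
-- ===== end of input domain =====

-- B builds a prefix-sum array once and forms each output entry as a difference of two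
-- clamped prefix sums, instead of A's direct guarded summation of neighbors (objective: alternative).


-- ===== PORT A =====
def mutate_array (n : Int) (a : List Int) : List Int :=
  -- b = [0] * n
  let b : List Int := List.replicate n.toNat 0
  -- for i in range(n): b[i] = left + middle + right
  (PySem.List.pyRange 0 n 1).foldl (fun b i =>
    let left := if i - 1 ≥ 0 then PySem.List.pyGetD a (i - 1) 0 else 0
    let middle := PySem.List.pyGetD a i 0
    let right := if i + 1 < n then PySem.List.pyGetD a (i + 1) 0 else 0
    PySem.List.pySetD b i (left + middle + right)) b

-- ===== PORT B =====
def mutate_array_alt (n : Int) (a : List Int) : List Int :=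
  -- p = [0]; for x in a[:n]: p.append(p[-1] + x)
  let p : List Int := (PySem.List.slice a none (some n)).foldl
    (fun p x => p ++ [PySem.List.pyGetD p (-1) 0 + x]) [0]
  -- [p[min(i + 2, n)] - p[max(i - 1, 0)] for i in range(n)]
  (PySem.List.pyRange 0 n 1).map (fun i =>
    PySem.List.pyGetD p (min (i + 2) n) 0 - PySem.List.pyGetD p (max (i - 1) 0) 0)

-- ===== PRECONDITION & SPEC =====
-- Pre_ excludes n > len(a), where the Python A raises IndexError (and so does B).
def Pre_mutate_array (n : Int) (a : List Int) : Prop := n ≤ (a.length : Int)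
instance (n : Int) (a : List Int) : Decidable (Pre_mutate_array n a) := by unfold Pre_mutate_array; infer_instance
def pvWitness_mutate_array : Int × List Int := (3, [4, 8, 6])
def Spec_mutate_array (n : Int) (a : List Int) (out : List Int) : Prop := out = mutate_array_alt n a
instance (n : Int) (a : List Int) (out : List Int) : Decidable (Spec_mutate_array n a out) := by unfold Spec_mutate_array; infer_instance

-- ===== CLAIM (what is proved, stated in full; the proofs are below) =====
def Claim_equal_mutate_array : Prop := ∀ (n : Int) (a : List Int), Dom_mutate_array n a → Pre_mutate_array n a → Spec_mutate_array n a (mutate_array n a)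


-- ===== LEMMAS AND PROOFS =====

-- A's loop: writing g i into slot i of b0, left to right, turns the prefix into a map.
lemma foldl_set_range (g : Nat → Int) (b0 : List Int) :
    ∀ k, k ≤ b0.length →
      (List.range k).foldl (fun b i => b.set i (g i)) b0
        = (List.range k).map g ++ b0.drop k := by
  intro k
  induction k with
  | zero => simp
  | succ k ih =>
    intro hk
    rw [List.range_succ, List.foldl_append, ih (by omega)]
    simp only [List.foldl_cons, List.foldl_nil]
    rw [List.set_append_right _ _ (by simp)]
    simp only [List.length_map, List.length_range, Nat.sub_self]
    rw [List.drop_eq_getElem_cons (show k < b0.length by omega), List.set_cons_zero]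
    simp

-- B's loop builds the running prefix sums: appending p[-1] + x produces the scan.
lemma scan_foldl (l : List Int) :
    ∀ (q : List Int) (s : Int),
      l.foldl (fun p x => p ++ [PySem.List.pyGetD p (-1) 0 + x]) (q ++ [s])
        = (q ++ [s]) ++ (List.range l.length).map (fun j => s + (l.take (j+1)).sum) := by
  induction l with
  | nil => simp
  | cons x xs ih =>
    intro q s
    simp only [List.foldl_cons, PySem.List.pyGetD_neg_one_append_singleton]
    rw [show q ++ [s] ++ [s + x] = (q ++ [s]) ++ [s + x] from rfl,
      ih (q ++ [s]) (s + x), List.append_assoc (q ++ [s])]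
    congr 1
    rw [List.length_cons, List.range_succ_eq_map, List.map_cons, List.map_map,
      List.singleton_append]
    congr 1
    · simp
    · apply List.map_congr_left
      intro j _
      simp only [Function.comp_apply, List.take_succ_cons, List.sum_cons]
      ring

lemma sum_take_succ (a : List Int) (j : Nat) (h : j < a.length) :
    (a.take (j+1)).sum = (a.take j).sum + a.getD j 0 := by
  rw [List.sum_take_succ a j h, List.getD_eq_getElem a 0 h]

theorem mutate_array_spec : Claim_equal_mutate_array := by
  intro n a _ hpre
  unfold Spec_mutate_array mutate_array mutate_array_alt Pre_mutate_array at *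
  by_cases hn : n ≤ 0
  · dsimp only
    rw [PySem.List.pyRange_one_eq_nil hn]
    simp [Int.toNat_of_nonpos hn]
  · have hn' : 0 < n := by omega
    have hm : n.toNat ≤ a.length := by omega
    have hnm : ((n.toNat : Nat) : Int) = n := Int.toNat_of_nonneg (by omega)
    dsimp only
    rw [show PySem.List.slice a none (some n) = a.take n.toNat from
      PySem.List.slice_to a (by omega)]
    have hp := scan_foldl (a.take n.toNat) [] 0
    simp only [List.nil_append, zero_add, List.singleton_append,
      List.length_take, Nat.min_eq_left hm] at hp
    rw [hp]
    -- P.getD j 0 is the sum of the first j elements of a, for j ≤ n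
    have hS : ∀ j : Nat, j ≤ n.toNat →
        (0 :: List.map (fun j => ((a.take n.toNat).take (j+1)).sum)
          (List.range n.toNat)).getD j 0 = (a.take j).sum := by
      intro j hj
      cases j with
      | zero => simp
      | succ j' =>
        simp only [List.getD_cons_succ]
        rw [List.getD_eq_getElem?_getD, List.getElem?_map]
        simp [show j' < n.toNat by omega, List.take_take]
    rw [PySem.List.pyRange_one 0 n]
    simp only [zero_add, Int.sub_zero, List.foldl_map, List.map_map,
      PySem.List.pySetD_natCast]
    rw [foldl_set_range _ _ _ (by simp)]
    rw [List.drop_eq_nil_of_le (by simp), List.append_nil]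
    apply List.map_congr_left
    intro k hk
    have hk' : k < n.toNat := List.mem_range.mp hk
    simp only [Function.comp_apply]
    -- rewrite B's clamped indices to Nat form, then reduce both sides to sums
    by_cases h1 : 1 ≤ k
    · have hmax : max ((k : Int) - 1) 0 = ((k - 1 : Nat) : Int) := by
        rw [max_eq_left (by omega)]; omega
      by_cases h2 : k + 2 ≤ n.toNat
      · have hmin : min ((k : Int) + 2) n = ((k + 2 : Nat) : Int) := by
          rw [min_eq_left (by omega)]; push_cast; ring
        rw [hmin, hmax, if_pos (by omega : (k : Int) - 1 ≥ 0),
          if_pos (by omega : (k : Int) + 1 < n),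
          show (k : Int) - 1 = ((k - 1 : Nat) : Int) by omega,
          show (k : Int) + 1 = ((k + 1 : Nat) : Int) by push_cast; ring]
        simp only [PySem.List.pyGetD_natCast]
        rw [hS (k + 2) (by omega), hS (k - 1) (by omega),
          sum_take_succ a (k + 1) (by omega), sum_take_succ a k (by omega),
          show (a.take k).sum = (a.take (k - 1)).sum + a.getD (k - 1) 0 by
            have h := sum_take_succ a (k - 1) (by omega)
            rwa [show k - 1 + 1 = k by omega] at h]
        ring
      · have hmin : min ((k : Int) + 2) n = ((k + 1 : Nat) : Int) := by
          rw [min_eq_right (by omega)]; omega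
        rw [hmin, hmax, if_pos (by omega : (k : Int) - 1 ≥ 0),
          if_neg (by omega : ¬ (k : Int) + 1 < n),
          show (k : Int) - 1 = ((k - 1 : Nat) : Int) by omega]
        simp only [PySem.List.pyGetD_natCast]
        rw [hS (k + 1) (by omega), hS (k - 1) (by omega),
          sum_take_succ a k (by omega),
          show (a.take k).sum = (a.take (k - 1)).sum + a.getD (k - 1) 0 by
            have h := sum_take_succ a (k - 1) (by omega)
            rwa [show k - 1 + 1 = k by omega] at h]
        ring
    · obtain rfl : k = 0 := by omega
      simp only [Nat.cast_zero, zero_sub, zero_add]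
      rw [if_neg (by omega : ¬ (-1 : Int) ≥ 0), max_eq_right (by omega : (-1 : Int) ≤ 0),
        PySem.List.pyGetD_zero_cons]
      by_cases h2 : 2 ≤ n.toNat
      · rw [min_eq_left (by omega : (2 : Int) ≤ n), if_pos (by omega : (1 : Int) < n),
          show (2 : Int) = ((2 : Nat) : Int) by norm_num,
          show (1 : Int) = ((1 : Nat) : Int) by norm_num]
        simp only [PySem.List.pyGetD_natCast]
        rw [hS 2 (by omega), sum_take_succ a 1 (by omega), sum_take_succ a 0 (by omega)]
        simp [PySem.List.pyGetD_zero]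
      · have hm1 : n.toNat = 1 := by omega
        rw [min_eq_right (by omega : n ≤ (2 : Int)), if_neg (by omega : ¬ (1 : Int) < n),
          show n = ((1 : Nat) : Int) by omega]
        simp only [PySem.List.pyGetD_natCast, Int.toNat_natCast]
        rw [hm1] at hS
        rw [hS 1 (by omega), sum_take_succ a 0 (by omega)]
        simp [PySem.List.pyGetD_zero]
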